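-- pv_equiv track=rewrite | github.com/glunana/SSM_LaboratoryWork_4 | main.py | antitransitivity
-- ===== SOURCE A (Python) =====
-- def antitransitivity(matrix):
--     n = len(matrix)
--
--     for i in range(n):
--         for j in range(n):
--             if matrix[i][j] == 1:
--                 for k in range(n):
--                     if matrix[j][k] == 1 and matrix[i][k] == 1:
--                         return False
--     return True
-- ===== SOURCE B (Python) =====
-- def antitransitivity(matrix):
--     n = len(matrix)
--     comp = [[any(matrix[i][j] == 1 and matrix[j][k] == 1 for j in range(n))
--              for k in range(n)] for i in range(n)]
--     return not any(matrix[i][k] == 1 and comp[i][k]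
--                    for i in range(n) for k in range(n))
-- ===== Notes on version B (the rewrite author's own statement) =====
-- stated objective: alternative
-- what changed: B first materialises the boolean 2-step composition table comp[i][k] (one full boolean matrix product) and then does a separate comparison pass over all (i,k), instead of A's single on-the-fly early-exit triple loop.
-- outside the precondition, e.g. on antitransitivity([[1], [1, 1]]): A returns False, B raises IndexError
import Mathlib
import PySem

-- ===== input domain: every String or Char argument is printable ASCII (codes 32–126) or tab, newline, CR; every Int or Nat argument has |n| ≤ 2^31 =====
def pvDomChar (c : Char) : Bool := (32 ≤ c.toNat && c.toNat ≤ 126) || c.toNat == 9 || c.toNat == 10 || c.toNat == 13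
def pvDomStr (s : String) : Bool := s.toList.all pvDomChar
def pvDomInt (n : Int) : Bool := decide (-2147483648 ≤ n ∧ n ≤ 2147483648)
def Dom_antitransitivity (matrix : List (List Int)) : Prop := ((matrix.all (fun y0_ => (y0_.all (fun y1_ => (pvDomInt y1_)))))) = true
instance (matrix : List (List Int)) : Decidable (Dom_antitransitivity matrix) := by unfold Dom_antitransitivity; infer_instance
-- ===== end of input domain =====

-- B builds the boolean two-step composition table first and then compares it against the
-- matrix in a second pass, instead of A's on-the-fly early-exit triple loop; objective: alternative.

-- matrix[i][j] (in range under Pre_)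
def pvMget (matrix : List (List Int)) (i j : Int) : Int :=
  PySem.List.pyGetD (PySem.List.pyGetD matrix i []) j 0

-- ===== PORT A =====
def antitransitivity (matrix : List (List Int)) : Bool :=
  let n : Int := matrix.length
  (PySem.List.pyRange 0 n 1).all fun i =>
    (PySem.List.pyRange 0 n 1).all fun j =>
      if pvMget matrix i j == 1 then
        (PySem.List.pyRange 0 n 1).all fun k =>
          !(pvMget matrix j k == 1 && pvMget matrix i k == 1)
      else true

-- ===== PORT B =====
def antitransitivity_alt (matrix : List (List Int)) : Bool :=
  let n : Int := matrix.length
  let r := PySem.List.pyRange 0 n 1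
  let comp : List (List Bool) :=
    r.map fun i => r.map fun k =>
      r.any fun j => pvMget matrix i j == 1 && pvMget matrix j k == 1
  !(r.any fun i => r.any fun k =>
      pvMget matrix i k == 1 && PySem.List.pyGetD (PySem.List.pyGetD comp i []) k false)

-- ===== PRECONDITION & SPEC =====
-- Pre_ excludes ragged matrices (a row shorter than len(matrix)): there the Python indexing can
-- raise IndexError; on some such inputs A still returns early via its short-circuit triple loop.
def Pre_antitransitivity (matrix : List (List Int)) : Prop :=
  ∀ row ∈ matrix, matrix.length ≤ row.length
instance (matrix : List (List Int)) : Decidable (Pre_antitransitivity matrix) := by unfold Pre_antitransitivity; infer_instance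
def pvWitness_antitransitivity : List (List Int) := [[0, 1], [0, 0]]

def Spec_antitransitivity (matrix : List (List Int)) (out : Bool) : Prop := out = antitransitivity_alt matrix
instance (matrix : List (List Int)) (out : Bool) : Decidable (Spec_antitransitivity matrix out) := by unfold Spec_antitransitivity; infer_instance

-- ===== CLAIM (what is proved, stated in full; the proofs are below) =====
def Claim_equal_antitransitivity : Prop := ∀ (matrix : List (List Int)), Dom_antitransitivity matrix → Pre_antitransitivity matrix → Spec_antitransitivity matrix (antitransitivity matrix)

-- ===== LEMMAS AND PROOFS =====

theorem ports_agree (matrix : List (List Int)) :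
    antitransitivity matrix = antitransitivity_alt matrix := by
  unfold antitransitivity antitransitivity_alt
  rw [Bool.eq_iff_iff]
  simp only [List.all_eq_true, List.any_eq_true, Bool.not_eq_eq_eq_not, Bool.not_true,
    List.any_eq_false, PySem.List.mem_pyRange_one, Bool.and_eq_true, beq_iff_eq]
  constructor
  · rintro h i ⟨hi0, hin⟩ ⟨k, ⟨hk0, hkn⟩, hik1, hcomp⟩
    rw [PySem.List.pyGetD_map_pyRange_of_nonneg _ _ _ _ hi0 hin,
        PySem.List.pyGetD_map_pyRange_of_nonneg _ _ _ _ hk0 hkn] at hcomp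
    simp only [List.any_eq_true, PySem.List.mem_pyRange_one, Bool.and_eq_true, beq_iff_eq] at hcomp
    obtain ⟨j, ⟨hj0, hjn⟩, hij1, hjk1⟩ := hcomp
    have := h i ⟨hi0, hin⟩ j ⟨hj0, hjn⟩
    rw [if_pos (by simpa using hij1)] at this
    simp only [List.all_eq_true, PySem.List.mem_pyRange_one, Bool.not_eq_eq_eq_not, Bool.not_true,
      Bool.and_eq_false_iff, beq_eq_false_iff_ne] at this
    rcases this k ⟨hk0, hkn⟩ with h' | h' <;> exact h' (by assumption)
  · intro h i ⟨hi0, hin⟩ j ⟨hj0, hjn⟩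
    split_ifs with hij
    · simp only [List.all_eq_true, PySem.List.mem_pyRange_one, Bool.not_eq_eq_eq_not, Bool.not_true,
        Bool.and_eq_false_iff, beq_eq_false_iff_ne]
      rintro k ⟨hk0, hkn⟩
      by_contra hc
      push Not at hc
      obtain ⟨hjk1, hik1⟩ := hc
      exact h i ⟨hi0, hin⟩ ⟨k, ⟨hk0, hkn⟩, hik1, by
        rw [PySem.List.pyGetD_map_pyRange_of_nonneg _ _ _ _ hi0 hin,
            PySem.List.pyGetD_map_pyRange_of_nonneg _ _ _ _ hk0 hkn]
        simp only [List.any_eq_true, PySem.List.mem_pyRange_one, Bool.and_eq_true, beq_iff_eq]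
        exact ⟨j, ⟨hj0, hjn⟩, by simpa using hij, hjk1⟩⟩
    · rfl

-- ===== VERDICT (by name: the statement is the Claim_ definition above) =====
theorem antitransitivity_spec : Claim_equal_antitransitivity := by
  intro m _ _
  exact ports_agree m
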